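-- pv_equiv track=rewrite | github.com/handsomem1n/Data_Structure | 중간범위/try/1.py | findadjacentnum
-- ===== SOURCE A (Python) =====
-- def findadjacentnum(arr):
--     low = 0
--     high = len(arr) - 1
--
--     while low < high:
--         mid = (low + high) // 2
--
--         # 중간 원소와 다음 원소가 다르면 해당 위치를 반환
--         if arr[mid] != arr[mid + 1]:
--             return mid
--
--         # 중간 원소와 앞 원소가 같다면, 다른 원소는 mid 이후에 위치한다.
--         if arr[mid] == arr[0]:
--             low = mid + 1
--         # 그렇지 않다면, 다른 원소는 mid 이전에 위치한다.
--         else: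
--             high = mid
--
--     return -1  # 해당하는 원소가 없을 때 (이 경우는 문제 조건상 발생하지 않음)
-- ===== SOURCE B (Python) =====
-- def findadjacentnum(arr):
--     # Divide-and-conquer on list slices instead of index pairs: go(lo, seg)
--     # searches the sublist seg = arr[lo:lo+len(seg)], splitting it with slicing.
--     def go(lo, seg):
--         m = len(seg)
--         if m <= 1:
--             return -1
--         k = (m - 1) // 2
--         if seg[k] != seg[k + 1]:
--             return lo + k
--         if seg[k] == arr[0]:
--             return go(lo + k + 1, seg[k + 1:])
--         return go(lo, seg[:k + 1])
--     return go(0, arr)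
-- ===== Notes on version B (the rewrite author's own statement) =====
-- stated objective: alternative
-- what changed: Same binary search, but decomposed as divide-and-conquer recursion on list slices: a helper go(lo, seg) splits the current sublist with seg[k+1:]/seg[:k+1] slicing and a relative midpoint, instead of A's while loop moving low/high indices over the whole array.
import Mathlib
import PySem

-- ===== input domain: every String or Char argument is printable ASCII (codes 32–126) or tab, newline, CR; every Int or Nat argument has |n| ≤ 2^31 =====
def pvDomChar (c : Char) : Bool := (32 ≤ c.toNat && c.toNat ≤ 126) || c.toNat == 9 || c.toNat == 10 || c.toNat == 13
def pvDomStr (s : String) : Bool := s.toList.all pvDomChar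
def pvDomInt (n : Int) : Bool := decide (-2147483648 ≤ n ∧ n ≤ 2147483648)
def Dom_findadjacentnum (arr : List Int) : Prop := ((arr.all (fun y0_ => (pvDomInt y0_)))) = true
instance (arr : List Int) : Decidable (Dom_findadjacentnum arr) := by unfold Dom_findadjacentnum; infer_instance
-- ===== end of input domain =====

-- B replaces A's index-pair while loop by a divide-and-conquer recursion on list
-- slices (the current sublist is split with take/drop); same values everywhere
-- (objective: alternative).

-- ===== PORT A =====
-- A's while-loop as tail recursion over the loop state (low, high); indices are always in
-- range while the guard low < high holds (0 ≤ low ≤ mid < mid+1 ≤ high ≤ len-1), so pyGetD is exact.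
def pvAWhile (arr : List Int) (low high : Int) : Int :=
  if hlt : low < high then
    let mid := PySem.Int.floordiv (low + high) 2
    if PySem.List.pyGetD arr mid 0 ≠ PySem.List.pyGetD arr (mid + 1) 0 then mid
    else if PySem.List.pyGetD arr mid 0 = PySem.List.pyGetD arr 0 0 then
      pvAWhile arr (mid + 1) high
    else
      pvAWhile arr low mid
  else (-1)
termination_by (high - low).toNat
decreasing_by
  all_goals
    have h1 := (PySem.Int.floordiv_two_mid_bounds (lo := low) (hi := high) (by omega)).1
    have h2 : PySem.Int.floordiv (low + high) 2 < high :=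
      (PySem.Int.floordiv_lt_iff_lt_mul (by omega)).mpr (by omega)
    omega

def findadjacentnum (arr : List Int) : Int :=
  pvAWhile arr 0 ((arr.length : Int) - 1)

-- ===== PORT B =====
-- go(lo, seg): searches the slice seg (= arr[lo:lo+len(seg)]); the relative midpoint is
-- k = (m-1)//2 (Nat division = Python's // on these nonnegative ints), the recursive calls
-- pass the Python slices seg[k+1:] / seg[:k+1] as List.drop / List.take (exact: the bounds
-- are nonnegative and within range).  seg[k] / seg[k+1] are in range since 2 ≤ m.
def pvBGo (arr : List Int) (lo : Int) (seg : List Int) : Int :=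
  let m := seg.length
  if m ≤ 1 then (-1)
  else
    let k := (m - 1) / 2
    if PySem.List.pyGetD seg (k : Int) 0 ≠ PySem.List.pyGetD seg ((k : Int) + 1) 0 then
      lo + (k : Int)
    else if PySem.List.pyGetD seg (k : Int) 0 = PySem.List.pyGetD arr 0 0 then
      pvBGo arr (lo + (k : Int) + 1) (seg.drop (k + 1))
    else
      pvBGo arr lo (seg.take (k + 1))
termination_by seg.length
decreasing_by
  · simp only [List.length_drop]; omega
  · simp only [List.length_take]; omega

def findadjacentnum_alt (arr : List Int) : Int :=
  pvBGo arr 0 arr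

-- ===== PRECONDITION & SPEC =====
def Spec_findadjacentnum (arr : List Int) (out : Int) : Prop := out = findadjacentnum_alt arr
instance (arr : List Int) (out : Int) : Decidable (Spec_findadjacentnum arr out) := by unfold Spec_findadjacentnum; infer_instance

-- ===== CLAIM (what is proved, stated in full; the proofs are below) =====
def Claim_equal_findadjacentnum : Prop := ∀ (arr : List Int), Dom_findadjacentnum arr → Spec_findadjacentnum arr (findadjacentnum arr)

-- ===== LEMMAS AND PROOFS =====

-- Reading the slice (arr.drop lo).take m at a valid relative index i is reading arr at lo+i.
theorem pvSegGet (arr : List Int) (lo m i : Nat) (hi : i < m) (hle : lo + m ≤ arr.length) :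
    PySem.List.pyGetD ((arr.drop lo).take m) (i : Int) 0 = PySem.List.pyGetD arr (((lo + i : Nat) : Int)) 0 := by
  rw [PySem.List.pyGetD_natCast, PySem.List.pyGetD_natCast]
  have h1 : i < ((arr.drop lo).take m).length := by
    simp only [List.length_take, List.length_drop]; omega
  have h2 : lo + i < arr.length := by omega
  rw [List.getD_eq_getElem _ _ h1, List.getD_eq_getElem _ _ h2]
  simp [List.getElem_take, List.getElem_drop]

-- Main invariant: A's loop on (lo, lo+|seg|-1) computes what B's slice recursion computes
-- on (lo, seg), whenever seg is the slice of arr starting at lo.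
theorem pvAWhile_eq_pvBGo (arr : List Int) :
    ∀ (n lo : Nat) (seg : List Int), seg.length ≤ n →
      seg = (arr.drop lo).take seg.length → lo + seg.length ≤ arr.length →
      pvAWhile arr (lo : Int) ((lo : Int) + (seg.length : Int) - 1) = pvBGo arr (lo : Int) seg := by
  intro n
  induction n with
  | zero =>
    intro lo seg hn hseg hle
    have hm : seg.length = 0 := by omega
    rw [pvAWhile, pvBGo]
    simp [hm]
  | succ n ih =>
    intro lo seg hn hseg hle
    set m := seg.length with hmdef
    by_cases hm1 : m ≤ 1
    · rw [pvAWhile, pvBGo]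
      have hA : ¬ ((lo : Int) < (lo : Int) + (m : Int) - 1) := by omega
      simp only [dif_neg hA]
      rw [if_pos (by omega : seg.length ≤ 1)]
    · -- 2 ≤ m
      have hm2 : 2 ≤ m := by omega
      set k := (m - 1) / 2 with hkdef
      have hk1 : 2 * k ≤ m - 1 := by omega
      have hk2 : m - 1 < 2 * k + 2 := by omega
      have hklt : k + 1 < m := by omega
      -- A's integer midpoint is lo + k
      have hmid : PySem.Int.floordiv ((lo : Int) + ((lo : Int) + (m : Int) - 1)) 2
          = (lo : Int) + (k : Int) := by
        rw [PySem.Int.floordiv_eq_iff_of_pos (by omega)]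
        constructor <;> omega
      have hget1 : PySem.List.pyGetD arr ((lo : Int) + (k : Int)) 0
          = PySem.List.pyGetD seg (k : Int) 0 := by
        rw [hseg, pvSegGet arr lo m k (by omega) hle]
        congr 1
      have hget2 : PySem.List.pyGetD arr ((lo : Int) + (k : Int) + 1) 0
          = PySem.List.pyGetD seg ((k : Int) + 1) 0 := by
        have : (k : Int) + 1 = ((k + 1 : Nat) : Int) := by push_cast; ring
        rw [hseg, this, pvSegGet arr lo m (k + 1) hklt hle]
        congr 1
      rw [pvAWhile, pvBGo]
      have hlt : (lo : Int) < (lo : Int) + (m : Int) - 1 := by omega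
      rw [dif_pos hlt, if_neg (by omega : ¬ m ≤ 1)]
      simp only [hmid, hget1, hget2, ← hmdef, ← hkdef]
      split_ifs with hc1 hc2
      · rfl
      · -- right half: lo' = lo + k + 1, seg' = seg.drop (k+1)
        have hlen' : (seg.drop (k + 1)).length = m - (k + 1) := by
          simp [List.length_drop, ← hmdef]
        have hseg' : seg.drop (k + 1) = (arr.drop (lo + (k + 1))).take ((seg.drop (k + 1)).length) := by
          rw [hlen']
          conv_lhs => rw [hseg]
          rw [List.drop_take, List.drop_drop]
        have := ih (lo + (k + 1)) (seg.drop (k + 1)) (by omega) hseg' (by omega)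
        rw [hlen'] at this
        have e1 : (lo : Int) + (k : Int) + 1 = (((lo + (k + 1) : Nat)) : Int) := by push_cast; ring
        have e2 : (lo : Int) + (m : Int) - 1
            = (((lo + (k + 1) : Nat)) : Int) + ((m - (k + 1) : Nat) : Int) - 1 := by push_cast; omega
        rw [e1, e2, this]
      · -- left half: lo' = lo, seg' = seg.take (k+1)
        have hlen' : (seg.take (k + 1)).length = k + 1 := by
          simp [List.length_take, ← hmdef]; omega
        have hseg' : seg.take (k + 1) = (arr.drop lo).take ((seg.take (k + 1)).length) := by
          rw [hlen']
          conv_lhs => rw [hseg]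
          rw [List.take_take]
          congr 1
          omega
        have := ih lo (seg.take (k + 1)) (by omega) hseg' (by omega)
        rw [hlen'] at this
        have e2 : (lo : Int) + (k : Int) = (lo : Int) + ((k + 1 : Nat) : Int) - 1 := by push_cast; ring
        rw [e2, this]

-- ===== VERDICT (by name: the statement is the Claim_ definition above) =====
theorem findadjacentnum_spec : Claim_equal_findadjacentnum := by
  intro arr _
  unfold Spec_findadjacentnum findadjacentnum findadjacentnum_alt
  have := pvAWhile_eq_pvBGo arr arr.length 0 arr le_rfl (by simp) (by omega)
  simpa using this
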